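-- pv_equiv track=rewrite | github.com/fchicout/zotero-cli | bibtools/tests/test_behavioral_equivalence.py | extract_bibtex_entries
-- ===== SOURCE A (Python) =====
-- def extract_bibtex_entries(content):
--     """Extract individual BibTeX entries from content."""
--     entries = []
--     current_entry = []
--     in_entry = False
--
--     for line in content.split('\n'):
--         line = line.strip()
--         if line.startswith('@'):
--             if current_entry:
--                 entries.append('\n'.join(current_entry))
--             current_entry = [line]
--             in_entry = True
--         elif in_entry:
--             current_entry.append(line)
--             if line == '}':
--                 entries.append('\n'.join(current_entry))
--                 current_entry = []
--                 in_entry = False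
--
--     if current_entry:
--         entries.append('\n'.join(current_entry))
--
--     return entries
-- ===== SOURCE B (Python) =====
-- def extract_bibtex_entries(content):
--     """Extract individual BibTeX entries from content."""
--     lines = [line.strip() for line in content.split('\n')]
--     # drop any preamble before the first '@' line
--     while lines and not lines[0].startswith('@'):
--         lines = lines[1:]
--     entries = []
--     while lines:
--         # the segment runs from this '@' line up to (not including) the next '@' line
--         k = 1
--         while k < len(lines) and not lines[k].startswith('@'):
--             k += 1
--         seg = lines[:k]
--         # an entry closes at the first bare '}'; anything after it in the segment is dropped
--         if '}' in seg:
--             seg = seg[:seg.index('}') + 1]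
--         entries.append('\n'.join(seg))
--         lines = lines[k:]
--     return entries
-- ===== Notes on version B (the rewrite author's own statement) =====
-- stated objective: alternative
-- what changed: Replaces A's streaming state machine (current-entry accumulator with an in_entry flag) by a segment decomposition: skip the preamble, split the stripped lines into segments at each '@' line, cut each segment at its first bare '}', and join.
import Mathlib
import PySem

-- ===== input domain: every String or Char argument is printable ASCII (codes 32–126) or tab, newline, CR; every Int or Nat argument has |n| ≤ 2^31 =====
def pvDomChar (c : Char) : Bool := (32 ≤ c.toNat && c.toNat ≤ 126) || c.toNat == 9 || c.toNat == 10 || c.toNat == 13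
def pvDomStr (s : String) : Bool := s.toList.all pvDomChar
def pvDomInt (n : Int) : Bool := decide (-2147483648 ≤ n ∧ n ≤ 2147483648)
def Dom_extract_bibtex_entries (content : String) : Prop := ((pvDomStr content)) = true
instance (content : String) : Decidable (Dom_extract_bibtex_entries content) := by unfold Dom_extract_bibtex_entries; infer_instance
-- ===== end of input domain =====

-- B replaces A's streaming in_entry state machine by a skip/segment/cut decomposition; same results, same cost.

-- ===== PORT A =====
-- '\n'.join(xs) (shared by both ports)
def pvJoinNL (xs : List String) : String := PySem.Str.join "\n" xs

-- content.split('\n') (shared by both ports; the separator is nonempty, so split? never raises)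
def pvSplitNL (content : String) : List String := (PySem.Str.split? content "\n").getD []

-- the body of A's for-loop: state = (entries, current_entry, in_entry)
def pvStepA (st : List String × List String × Bool) (line0 : String) :
    List String × List String × Bool :=
  let line := PySem.Str.strip line0
  if PySem.Str.startswith line "@" then
    ((if st.2.1 = [] then st.1 else st.1 ++ [pvJoinNL st.2.1]), [line], true)
  else if st.2.2 then
    let cur := st.2.1 ++ [line]
    if line = "}" then (st.1 ++ [pvJoinNL cur], [], false) else (st.1, cur, true)
  else st

def extract_bibtex_entries (content : String) : List String :=
  let fin := (pvSplitNL content).foldl pvStepA ([], [], false)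
  if fin.2.1 = [] then fin.1 else fin.1 ++ [pvJoinNL fin.2.1]

-- ===== PORT B =====
-- Source B's first while loop: drop lines before the first '@' line
def pvSkip : List String → List String
  | [] => []
  | l :: rest => if PySem.Str.startswith l "@" then l :: rest else pvSkip rest

-- Source B's inner while loop (the scan to index k): lines before / from the next '@' line
def pvSpan : List String → List String × List String
  | [] => ([], [])
  | l :: rest =>
    if PySem.Str.startswith l "@" then ([], l :: rest)
    else
      let p := pvSpan rest
      (l :: p.1, p.2)

theorem pvSpan_snd_length_le (ls : List String) : (pvSpan ls).2.length ≤ ls.length := by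
  induction ls with
  | nil => simp [pvSpan]
  | cons l rest ih =>
    simp only [pvSpan]
    split
    · simp
    · simpa using Nat.le_succ_of_le ih

-- Source B's outer while loop: split into segments, one per '@' line
def pvSegs : List String → List (List String)
  | [] => []
  | l :: rest => (l :: (pvSpan rest).1) :: pvSegs (pvSpan rest).2
termination_by ls => ls.length
decreasing_by
  simpa using Nat.lt_succ_of_le (pvSpan_snd_length_le rest)

-- if '}' in seg: seg = seg[:seg.index('}') + 1]
def pvCut (seg : List String) : List String :=
  if "}" ∈ seg then seg.take (seg.idxOf "}" + 1) else seg

def extract_bibtex_entries_alt (content : String) : List String :=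
  let lines := (pvSplitNL content).map PySem.Str.strip
  (pvSegs (pvSkip lines)).map (fun seg => pvJoinNL (pvCut seg))

-- ===== PRECONDITION & SPEC =====
def Spec_extract_bibtex_entries (content : String) (out : List String) : Prop := out = extract_bibtex_entries_alt content
instance (content : String) (out : List String) : Decidable (Spec_extract_bibtex_entries content out) := by unfold Spec_extract_bibtex_entries; infer_instance

-- ===== CLAIM (what is proved, stated in full; the proofs are below) =====
def Claim_equal_extract_bibtex_entries : Prop := ∀ (content : String), Dom_extract_bibtex_entries content → Spec_extract_bibtex_entries content (extract_bibtex_entries content)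

-- ===== LEMMAS AND PROOFS =====

-- A's loop step on an already-stripped line
def pvStep' (st : List String × List String × Bool) (line : String) :
    List String × List String × Bool :=
  if PySem.Str.startswith line "@" then
    ((if st.2.1 = [] then st.1 else st.1 ++ [pvJoinNL st.2.1]), [line], true)
  else if st.2.2 then
    let cur := st.2.1 ++ [line]
    if line = "}" then (st.1 ++ [pvJoinNL cur], [], false) else (st.1, cur, true)
  else st

-- A's final flush
def pvFin (st : List String × List String × Bool) : List String :=
  if st.2.1 = [] then st.1 else st.1 ++ [pvJoinNL st.2.1]

theorem pvAt_ne_brace (r : String) (h : PySem.Str.startswith r "@" = true) : r ≠ "}" := by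
  intro he; subst he; exact absurd h (by decide)

theorem pvCut_of_not_mem (s : List String) (h : "}" ∉ s) : pvCut s = s := by
  simp [pvCut, h]

theorem pvCut_append_brace (cur z : List String) (h : "}" ∉ cur) :
    pvCut (cur ++ "}" :: z) = cur ++ ["}"] := by
  induction cur with
  | nil => simp [pvCut]
  | cons a cs ih =>
    have ha : a ≠ "}" := fun he => h (by simp [he])
    have hcs : "}" ∉ cs := fun hm => h (by simp [hm])
    have hmem' : "}" ∈ cs ++ "}" :: z := by simp
    have hmem : "}" ∈ (a :: cs) ++ "}" :: z := by simp
    rw [pvCut, if_pos hmem, List.cons_append]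
    rw [List.idxOf_cons_ne _ ha]
    simp only [List.take_succ_cons]
    have := ih hcs
    rw [pvCut, if_pos hmem'] at this
    simp [this]

theorem pvSpan_snd_eq_skip (ls : List String) : (pvSpan ls).2 = pvSkip ls := by
  induction ls with
  | nil => rfl
  | cons l rest ih =>
    simp only [pvSpan, pvSkip]
    split
    · rfl
    · simpa using ih

theorem pvMainEntry : ∀ (n : Nat) (ls : List String), ls.length ≤ n →
    (∀ E : List String,
      pvFin (ls.foldl pvStep' (E, [], false)) =
        E ++ (pvSegs (pvSkip ls)).map (fun s => pvJoinNL (pvCut s))) ∧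
    (∀ (E cur : List String), cur ≠ [] → "}" ∉ cur →
      pvFin (ls.foldl pvStep' (E, cur, true)) =
        E ++ [pvJoinNL (pvCut (cur ++ (pvSpan ls).1))] ++
          ((pvSegs (pvSpan ls).2).map (fun s => pvJoinNL (pvCut s)))) := by
  intro n
  induction n with
  | zero =>
    intro ls hls
    have : ls = [] := List.eq_nil_of_length_eq_zero (Nat.le_zero.mp hls)
    subst this
    constructor
    · intro E; simp [pvFin, pvSkip, pvSegs]
    · intro E cur hc hb
      simp [pvFin, pvSpan, pvSegs, hc, pvCut_of_not_mem cur hb]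
  | succ n ih =>
    intro ls hls
    cases ls with
    | nil =>
      constructor
      · intro E; simp [pvFin, pvSkip, pvSegs]
      · intro E cur hc hb
        simp [pvFin, pvSpan, pvSegs, hc, pvCut_of_not_mem cur hb]
    | cons r rs =>
      have hrs : rs.length ≤ n := by
        simpa using Nat.lt_succ_iff.mp (Nat.lt_of_lt_of_le (by simp) hls)
      constructor
      · -- Main part: state ([], false)
        intro E
        by_cases hr : PySem.Str.startswith r "@" = true
        · have hr' : PySem.Chars.startswith r.toList ['@'] = true := by simpa using hr
          have hstep : pvStep' (E, [], false) r = (E, [r], true) := by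
            simp [pvStep', hr']
          rw [List.foldl_cons, hstep]
          rw [(ih rs hrs).2 E [r] (by simp)
            (by simpa using Ne.symm (pvAt_ne_brace r hr))]
          rw [pvSkip, if_pos hr, pvSegs]
          simp
        · have hr' : PySem.Chars.startswith r.toList ['@'] = false := by
            simpa using hr
          have hstep : pvStep' (E, [], false) r = (E, [], false) := by
            simp [pvStep', hr']
          rw [List.foldl_cons, hstep, (ih rs hrs).1 E]
          rw [pvSkip, if_neg hr]
      · -- Entry part: state (cur, true)
        intro E cur hc hb
        by_cases hr : PySem.Str.startswith r "@" = true
        · have hr' : PySem.Chars.startswith r.toList ['@'] = true := by simpa using hr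
          have hstep : pvStep' (E, cur, true) r = (E ++ [pvJoinNL cur], [r], true) := by
            simp [pvStep', hr', hc]
          rw [List.foldl_cons, hstep]
          rw [(ih rs hrs).2 (E ++ [pvJoinNL cur]) [r] (by simp)
            (by simpa using Ne.symm (pvAt_ne_brace r hr))]
          rw [pvSpan, if_pos hr, pvSegs]
          simp [pvCut_of_not_mem cur hb]
        · have hr' : PySem.Chars.startswith r.toList ['@'] = false := by
            simpa using hr
          by_cases hbr : r = "}"
          · subst hbr
            have hns : PySem.Chars.startswith ['}'] ['@'] = false := by decide
            have hstep : pvStep' (E, cur, true) "}" =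
                (E ++ [pvJoinNL (cur ++ ["}"])], [], false) := by
              simp [pvStep', hns]
            rw [List.foldl_cons, hstep, (ih rs hrs).1 (E ++ [pvJoinNL (cur ++ ["}"])])]
            have hsp : pvSpan ("}" :: rs) = ("}" :: (pvSpan rs).1, (pvSpan rs).2) := by
              simp [pvSpan, hns]
            rw [hsp]
            simp [pvCut_append_brace cur (pvSpan rs).1 hb, pvSpan_snd_eq_skip]
          · have hstep : pvStep' (E, cur, true) r = (E, cur ++ [r], true) := by
              simp [pvStep', hr', hbr]
            rw [List.foldl_cons, hstep]
            have hb' : "}" ∉ cur ++ [r] := by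
              simp [hb, Ne.symm hbr]
            rw [(ih rs hrs).2 E (cur ++ [r]) (by simp) hb']
            rw [pvSpan, if_neg hr]
            simp

-- ===== VERDICT (by name: the statement is the Claim_ definition above) =====
theorem extract_bibtex_entries_spec : Claim_equal_extract_bibtex_entries := by
  intro content _
  unfold Spec_extract_bibtex_entries extract_bibtex_entries extract_bibtex_entries_alt
  have h1 : (pvSplitNL content).foldl pvStepA ([], [], false) =
      ((pvSplitNL content).map PySem.Str.strip).foldl pvStep' ([], [], false) := by
    rw [List.foldl_map]
    rfl
  rw [h1]
  exact (pvMainEntry ((pvSplitNL content).map PySem.Str.strip).length _ le_rfl).1 []
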